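-- pv_equiv track=rewrite | github.com/lukexyz/cartographer | community/dire_straits/precalculate_route_info.py | has_sufficient_coverage
-- ===== SOURCE A (Python) =====
-- from math import dist, ceil, floor
--
-- dimension = 8
--
-- def has_sufficient_coverage(players):
--
--     nn = False
--     np = False
--     pn = False
--     pp = False
--
--     upper = ceil((dimension-1)*0.6)
--     lower = floor((dimension-1)*0.4)
--
--     for x, y in players:
--
--         if x >= upper:
--             if y >= upper:
--                 pp = True
--             elif y <= lower:
--                 pn = True
--         elif x <= lower:
--             if y >= upper:
--                 np = True
--             elif y <= lower:
--                 nn = True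
--
--     return (nn and np and pn and pp)
-- ===== SOURCE B (Python) =====
-- from math import ceil, floor
--
-- dimension = 8
--
-- def has_sufficient_coverage(players):
--     upper = ceil((dimension - 1) * 0.6)
--     lower = floor((dimension - 1) * 0.4)
--     corners = [
--         lambda x, y: x >= upper and y >= upper,
--         lambda x, y: x >= upper and y <= lower,
--         lambda x, y: x <= lower and y >= upper,
--         lambda x, y: x <= lower and y <= lower,
--     ]
--     return all(any(pred(x, y) for x, y in players) for pred in corners)
-- ===== Notes on version B (the rewrite author's own statement) =====
-- stated objective: simpler
-- what changed: Replaces the single flag-setting pass with nested if/elif over a 4-boolean state by four independent corner predicates, each checked with its own any() scan under an all().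
import Mathlib
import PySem

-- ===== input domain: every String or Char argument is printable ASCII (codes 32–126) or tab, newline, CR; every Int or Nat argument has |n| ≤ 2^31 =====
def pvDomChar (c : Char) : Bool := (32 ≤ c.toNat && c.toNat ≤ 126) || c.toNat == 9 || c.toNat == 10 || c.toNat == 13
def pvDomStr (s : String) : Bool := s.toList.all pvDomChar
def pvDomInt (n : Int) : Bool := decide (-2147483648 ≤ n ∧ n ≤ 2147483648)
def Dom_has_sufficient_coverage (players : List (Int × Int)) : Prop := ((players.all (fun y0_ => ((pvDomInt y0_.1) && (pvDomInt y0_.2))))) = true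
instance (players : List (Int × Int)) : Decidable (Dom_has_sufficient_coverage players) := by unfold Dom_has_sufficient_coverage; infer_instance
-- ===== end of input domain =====

-- B is a different decomposition (four independent any-scans under all, vs A's one pass updating four flags); same O(n) cost.

-- ===== PORT A =====
-- upper = ceil(7*0.6) = ceil(4.2) = 5 and lower = floor(7*0.4) = floor(2.8) = 2: the float
-- computation is exact for these constants, so the port uses the integer literals 5 and 2.
-- The loop body is the nested if/elif structure of A, folded over the 4-flag state (nn, np, pn, pp).
def pvStepA (s : Bool × Bool × Bool × Bool) (p : Int × Int) : Bool × Bool × Bool × Bool :=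
  if p.1 ≥ 5 then
    (if p.2 ≥ 5 then (s.1, s.2.1, s.2.2.1, true)
     else if p.2 ≤ 2 then (s.1, s.2.1, true, s.2.2.2)
     else s)
  else if p.1 ≤ 2 then
    (if p.2 ≥ 5 then (s.1, true, s.2.2.1, s.2.2.2)
     else if p.2 ≤ 2 then (true, s.2.1, s.2.2.1, s.2.2.2)
     else s)
  else s

def has_sufficient_coverage (players : List (Int × Int)) : Bool :=
  let r := players.foldl pvStepA (false, false, false, false)
  r.1 && r.2.1 && r.2.2.1 && r.2.2.2

-- ===== PORT B =====
def has_sufficient_coverage_alt (players : List (Int × Int)) : Bool :=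
  let corners : List ((Int × Int) → Bool) :=
    [ fun p => p.1 ≥ 5 && p.2 ≥ 5
    , fun p => p.1 ≥ 5 && p.2 ≤ 2
    , fun p => p.1 ≤ 2 && p.2 ≥ 5
    , fun p => p.1 ≤ 2 && p.2 ≤ 2 ]
  corners.all (fun pred => players.any pred)

-- ===== PRECONDITION & SPEC =====
def Spec_has_sufficient_coverage (players : List (Int × Int)) (out : Bool) : Prop := out = has_sufficient_coverage_alt players
instance (players : List (Int × Int)) (out : Bool) : Decidable (Spec_has_sufficient_coverage players out) := by unfold Spec_has_sufficient_coverage; infer_instance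

-- ===== CLAIM (what is proved, stated in full; the proofs are below) =====
def Claim_equal_has_sufficient_coverage : Prop := ∀ (players : List (Int × Int)), Dom_has_sufficient_coverage players → Spec_has_sufficient_coverage players (has_sufficient_coverage players)

-- ===== LEMMAS AND PROOFS =====
-- The fold's four flags are exactly the four any-scans, each OR'ed with its initial value.
theorem pvFoldA_char (l : List (Int × Int)) (s : Bool × Bool × Bool × Bool) :
    l.foldl pvStepA s =
      ( s.1 || l.any (fun p => p.1 ≤ 2 && p.2 ≤ 2)
      , s.2.1 || l.any (fun p => p.1 ≤ 2 && p.2 ≥ 5)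
      , s.2.2.1 || l.any (fun p => p.1 ≥ 5 && p.2 ≤ 2)
      , s.2.2.2 || l.any (fun p => p.1 ≥ 5 && p.2 ≥ 5)) := by
  induction l generalizing s with
  | nil => simp
  | cons p t ih =>
    obtain ⟨x, y⟩ := p
    simp only [List.foldl_cons, ih, pvStepA, List.any_cons]
    obtain ⟨a, b, c, d⟩ := s
    by_cases h1 : (5:Int) ≤ x <;> by_cases h2 : x ≤ 2 <;>
      by_cases h3 : (5:Int) ≤ y <;> by_cases h4 : y ≤ 2 <;>
      simp [h1, h2, h3, h4] <;> omega

-- ===== VERDICT (by name: the statement is the Claim_ definition above) =====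
theorem has_sufficient_coverage_spec : Claim_equal_has_sufficient_coverage := by
  intro players _
  unfold Spec_has_sufficient_coverage has_sufficient_coverage has_sufficient_coverage_alt
  simp only [pvFoldA_char, List.all_cons, List.all_nil, Bool.false_or]
  cases h1 : players.any (fun p => p.1 ≥ 5 && p.2 ≥ 5) <;>
    cases h2 : players.any (fun p => p.1 ≥ 5 && p.2 ≤ 2) <;>
    cases h3 : players.any (fun p => p.1 ≤ 2 && p.2 ≥ 5) <;>
    cases h4 : players.any (fun p => p.1 ≤ 2 && p.2 ≤ 2) <;> simp
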